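-- pv_equiv track=rewrite | github.com/quangnx99/crawl4ai | docs/examples/product-extractor/server.py | _hostname_default
-- ===== SOURCE A (Python) =====
-- _HOSTNAME_DEFAULT_SHIPFROM = {
--     # Chinese marketplaces / dropshippers
--     "aliexpress.com": "CN",
--     "aliexpress.us": "CN",
--     "taobao.com": "CN",
--     "tmall.com": "CN",
--     "1688.com": "CN",
--     "shein.com": "CN",
--     "temu.com": "CN",
--     "banggood.com": "CN",
--     "dhgate.com": "CN",
--     "made-in-china.com": "CN",
--     "yupoo.com": "CN",
--     # Japan
--     "rakuten.co.jp": "JP",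
--     "yahoo.co.jp": "JP",
--     "mercari.jp": "JP",
--     "zozo.jp": "JP",
--     "zozotown.jp": "JP",
--     "buyee.jp": "JP",
--     "amazon.co.jp": "JP",
--     "uniqlo.com": "JP",  # default, overridden by path locale below
--     "muji.com": "JP",
--     "yodobashi.com": "JP",
--     "bic-camera.com": "JP",
--     # Korea
--     "coupang.com": "KR",
--     "gmarket.co.kr": "KR",
--     "11st.co.kr": "KR",
--     "naver.com": "KR",
--     # US
--     "amazon.com": "US",
--     "ebay.com": "US",
--     "walmart.com": "US",
--     "target.com": "US",
--     "bestbuy.com": "US",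
--     "nordstrom.com": "US",
--     "macys.com": "US",
--     "nike.com": "US",
--     "apple.com": "US",
--     "etsy.com": "US",
--     # UK
--     "amazon.co.uk": "GB",
--     "ebay.co.uk": "GB",
--     "asos.com": "GB",
--     "next.co.uk": "GB",
--     # Germany
--     "amazon.de": "DE",
--     "otto.de": "DE",
--     "zalando.de": "DE",
--     # France
--     "amazon.fr": "FR",
--     "cdiscount.com": "FR",
--     "fnac.com": "FR",
--     # Taiwan
--     "shopee.tw": "TW",
--     "pchome.com.tw": "TW",
--     "momoshop.com.tw": "TW",
--     # Thailand
--     "shopee.co.th": "TH",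
--     "lazada.co.th": "TH",
--     # Singapore
--     "shopee.sg": "SG",
--     "lazada.sg": "SG",
--     "qoo10.sg": "SG",
--     # Vietnam
--     "shopee.vn": "VN",
--     "lazada.vn": "VN",
--     "tiki.vn": "VN",
--     "sendo.vn": "VN",
--     "thegioididong.com": "VN",
--     "dienmayxanh.com": "VN",
--     "fptshop.com.vn": "VN",
-- }
--
-- def _hostname_default(hostname: str) -> str | None:
--     """Look up a best-effort ship-from by hostname suffix."""
--     host = hostname.lower().lstrip(".")
--     if host.startswith("www."):
--         host = host[4:]
--     for known, code in _HOSTNAME_DEFAULT_SHIPFROM.items():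
--         if host == known or host.endswith("." + known):
--             return code
--     return None
-- ===== SOURCE B (Python) =====
-- _HOSTNAME_DEFAULT_SHIPFROM = {
--     "aliexpress.com": "CN", "aliexpress.us": "CN", "taobao.com": "CN",
--     "tmall.com": "CN", "1688.com": "CN", "shein.com": "CN", "temu.com": "CN",
--     "banggood.com": "CN", "dhgate.com": "CN", "made-in-china.com": "CN",
--     "yupoo.com": "CN",
--     "rakuten.co.jp": "JP", "yahoo.co.jp": "JP", "mercari.jp": "JP",
--     "zozo.jp": "JP", "zozotown.jp": "JP", "buyee.jp": "JP",
--     "amazon.co.jp": "JP", "uniqlo.com": "JP", "muji.com": "JP",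
--     "yodobashi.com": "JP", "bic-camera.com": "JP",
--     "coupang.com": "KR", "gmarket.co.kr": "KR", "11st.co.kr": "KR",
--     "naver.com": "KR",
--     "amazon.com": "US", "ebay.com": "US", "walmart.com": "US",
--     "target.com": "US", "bestbuy.com": "US", "nordstrom.com": "US",
--     "macys.com": "US", "nike.com": "US", "apple.com": "US", "etsy.com": "US",
--     "amazon.co.uk": "GB", "ebay.co.uk": "GB", "asos.com": "GB",
--     "next.co.uk": "GB",
--     "amazon.de": "DE", "otto.de": "DE", "zalando.de": "DE",
--     "amazon.fr": "FR", "cdiscount.com": "FR", "fnac.com": "FR",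
--     "shopee.tw": "TW", "pchome.com.tw": "TW", "momoshop.com.tw": "TW",
--     "shopee.co.th": "TH", "lazada.co.th": "TH",
--     "shopee.sg": "SG", "lazada.sg": "SG", "qoo10.sg": "SG",
--     "shopee.vn": "VN", "lazada.vn": "VN", "tiki.vn": "VN", "sendo.vn": "VN",
--     "thegioididong.com": "VN", "dienmayxanh.com": "VN", "fptshop.com.vn": "VN",
-- }
--
--
-- def _hostname_default(hostname: str) -> str | None:
--     """Look up a best-effort ship-from by hostname suffix.
--
--     Instead of scanning every table entry, walk the host's own dot-boundary
--     suffixes (the full host, then drop the leftmost label repeatedly) and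
--     hash each candidate into the table; correct because no table key is a
--     dot-suffix of another, so at most one key can ever match.
--     """
--     cand = hostname.lower().lstrip(".")
--     if cand.startswith("www."):
--         cand = cand[4:]
--     while True:
--         code = _HOSTNAME_DEFAULT_SHIPFROM.get(cand)
--         if code is not None:
--             return code
--         dot = cand.find(".")
--         if dot < 0:
--             return None
--         cand = cand[dot + 1:]
-- ===== Notes on version B (the rewrite author's own statement) =====
-- stated objective: idiomatic
-- what changed: A scans all 61 table entries doing an equality/endswith test per entry; B instead walks the host's own dot-boundary suffixes (full host, then repeatedly drop the leftmost label) and does one dict lookup per suffix; equivalent because no table key is a dot-suffix of another, so at most one key can match.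
import Mathlib
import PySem

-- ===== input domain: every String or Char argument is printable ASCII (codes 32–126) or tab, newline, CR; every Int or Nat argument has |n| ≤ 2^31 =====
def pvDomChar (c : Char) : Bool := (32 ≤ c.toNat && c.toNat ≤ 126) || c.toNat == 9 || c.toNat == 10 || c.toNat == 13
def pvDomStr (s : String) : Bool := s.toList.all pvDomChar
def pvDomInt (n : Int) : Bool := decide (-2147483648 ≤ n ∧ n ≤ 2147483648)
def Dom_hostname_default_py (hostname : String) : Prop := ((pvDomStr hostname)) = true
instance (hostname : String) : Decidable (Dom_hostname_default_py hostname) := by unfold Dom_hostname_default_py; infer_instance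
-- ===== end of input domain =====

-- B replaces A's scan of every table entry (equality / dot-suffix test per entry) by a walk over the
-- host's own dot-boundary suffixes with one table lookup each; objective: idiomatic, same return value.

-- ===== PORT A =====
-- the module constant _HOSTNAME_DEFAULT_SHIPFROM as A iterates it: a dict literal, .items() in insertion order
def shipfromTable : List (List Char × String) := [
    (("aliexpress.com").toList, "CN"),
    (("aliexpress.us").toList, "CN"),
    (("taobao.com").toList, "CN"),
    (("tmall.com").toList, "CN"),
    (("1688.com").toList, "CN"),
    (("shein.com").toList, "CN"),
    (("temu.com").toList, "CN"),
    (("banggood.com").toList, "CN"),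
    (("dhgate.com").toList, "CN"),
    (("made-in-china.com").toList, "CN"),
    (("yupoo.com").toList, "CN"),
    (("rakuten.co.jp").toList, "JP"),
    (("yahoo.co.jp").toList, "JP"),
    (("mercari.jp").toList, "JP"),
    (("zozo.jp").toList, "JP"),
    (("zozotown.jp").toList, "JP"),
    (("buyee.jp").toList, "JP"),
    (("amazon.co.jp").toList, "JP"),
    (("uniqlo.com").toList, "JP"),
    (("muji.com").toList, "JP"),
    (("yodobashi.com").toList, "JP"),
    (("bic-camera.com").toList, "JP"),
    (("coupang.com").toList, "KR"),
    (("gmarket.co.kr").toList, "KR"),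
    (("11st.co.kr").toList, "KR"),
    (("naver.com").toList, "KR"),
    (("amazon.com").toList, "US"),
    (("ebay.com").toList, "US"),
    (("walmart.com").toList, "US"),
    (("target.com").toList, "US"),
    (("bestbuy.com").toList, "US"),
    (("nordstrom.com").toList, "US"),
    (("macys.com").toList, "US"),
    (("nike.com").toList, "US"),
    (("apple.com").toList, "US"),
    (("etsy.com").toList, "US"),
    (("amazon.co.uk").toList, "GB"),
    (("ebay.co.uk").toList, "GB"),
    (("asos.com").toList, "GB"),
    (("next.co.uk").toList, "GB"),
    (("amazon.de").toList, "DE"),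
    (("otto.de").toList, "DE"),
    (("zalando.de").toList, "DE"),
    (("amazon.fr").toList, "FR"),
    (("cdiscount.com").toList, "FR"),
    (("fnac.com").toList, "FR"),
    (("shopee.tw").toList, "TW"),
    (("pchome.com.tw").toList, "TW"),
    (("momoshop.com.tw").toList, "TW"),
    (("shopee.co.th").toList, "TH"),
    (("lazada.co.th").toList, "TH"),
    (("shopee.sg").toList, "SG"),
    (("lazada.sg").toList, "SG"),
    (("qoo10.sg").toList, "SG"),
    (("shopee.vn").toList, "VN"),
    (("lazada.vn").toList, "VN"),
    (("tiki.vn").toList, "VN"),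
    (("sendo.vn").toList, "VN"),
    (("thegioididong.com").toList, "VN"),
    (("dienmayxanh.com").toList, "VN"),
    (("fptshop.com.vn").toList, "VN")]
def shipfromDict : PySem.Dict (List Char) String := PySem.Dict.mk shipfromTable

-- 'for known, code in _HOSTNAME_DEFAULT_SHIPFROM.items(): if host == known or host.endswith("." + known): return code'
def lookupA (host : List Char) : List (List Char × String) → Option String
  | [] => none
  | (known, code) :: rest =>
      if host == known || PySem.Chars.endswith host ('.' :: known) then some code
      else lookupA host rest

def hostname_default_py (hostname : String) : Option String :=
  -- hostname.lower().lstrip(".") — lstrip(".") ported by hand as dropWhile (· == '.'), exact for the one-char strip set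
  let host0 := (PySem.Str.lower hostname).toList.dropWhile (· == '.')
  -- if host.startswith("www."): host = host[4:]
  let host := if PySem.Chars.startswith host0 ("www.").toList then PySem.List.slice host0 (some 4) none else host0
  lookupA host shipfromDict.items

-- ===== PORT B =====
-- B's view of the same dict: _HOSTNAME_DEFAULT_SHIPFROM.get(cand), ported as a total lookup function
-- (the dict's keys are distinct literals, so .get is exactly this 61-way case analysis)
def shipCode : String → Option String
  | "aliexpress.com" => some "CN"
  | "aliexpress.us" => some "CN"
  | "taobao.com" => some "CN"
  | "tmall.com" => some "CN"
  | "1688.com" => some "CN"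
  | "shein.com" => some "CN"
  | "temu.com" => some "CN"
  | "banggood.com" => some "CN"
  | "dhgate.com" => some "CN"
  | "made-in-china.com" => some "CN"
  | "yupoo.com" => some "CN"
  | "rakuten.co.jp" => some "JP"
  | "yahoo.co.jp" => some "JP"
  | "mercari.jp" => some "JP"
  | "zozo.jp" => some "JP"
  | "zozotown.jp" => some "JP"
  | "buyee.jp" => some "JP"
  | "amazon.co.jp" => some "JP"
  | "uniqlo.com" => some "JP"
  | "muji.com" => some "JP"
  | "yodobashi.com" => some "JP"
  | "bic-camera.com" => some "JP"
  | "coupang.com" => some "KR"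
  | "gmarket.co.kr" => some "KR"
  | "11st.co.kr" => some "KR"
  | "naver.com" => some "KR"
  | "amazon.com" => some "US"
  | "ebay.com" => some "US"
  | "walmart.com" => some "US"
  | "target.com" => some "US"
  | "bestbuy.com" => some "US"
  | "nordstrom.com" => some "US"
  | "macys.com" => some "US"
  | "nike.com" => some "US"
  | "apple.com" => some "US"
  | "etsy.com" => some "US"
  | "amazon.co.uk" => some "GB"
  | "ebay.co.uk" => some "GB"
  | "asos.com" => some "GB"
  | "next.co.uk" => some "GB"
  | "amazon.de" => some "DE"
  | "otto.de" => some "DE"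
  | "zalando.de" => some "DE"
  | "amazon.fr" => some "FR"
  | "cdiscount.com" => some "FR"
  | "fnac.com" => some "FR"
  | "shopee.tw" => some "TW"
  | "pchome.com.tw" => some "TW"
  | "momoshop.com.tw" => some "TW"
  | "shopee.co.th" => some "TH"
  | "lazada.co.th" => some "TH"
  | "shopee.sg" => some "SG"
  | "lazada.sg" => some "SG"
  | "qoo10.sg" => some "SG"
  | "shopee.vn" => some "VN"
  | "lazada.vn" => some "VN"
  | "tiki.vn" => some "VN"
  | "sendo.vn" => some "VN"
  | "thegioididong.com" => some "VN"
  | "dienmayxanh.com" => some "VN"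
  | "fptshop.com.vn" => some "VN"
  | _ => none

-- 'while True: code = table.get(cand); if code is not None: return code; dot = cand.find("."); if dot < 0: return None; cand = cand[dot+1:]'
def scanB (cand : List Char) : Option String :=
  match shipCode (String.ofList cand) with
  | some code => some code
  | none =>
      if _h : PySem.Chars.find cand ['.'] < 0 then none
      else
        -- cand[dot + 1:] with 0 ≤ dot is exactly drop (dot + 1)
        scanB (cand.drop (PySem.Chars.find cand ['.'] + 1).toNat)
termination_by cand.length
decreasing_by
  have h0 : 0 ≤ PySem.Chars.find cand ['.'] := le_of_not_gt _h
  have hinf : ['.'] <:+: cand := (PySem.Chars.find_nonneg_iff cand ['.']).mp h0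
  have hlen : 1 ≤ cand.length := by simpa using hinf.length_le
  simp only [List.length_drop]
  omega

def hostname_default_py_alt (hostname : String) : Option String :=
  -- same normalization: lower, lstrip("."), one "www." strip
  let cand0 := (PySem.Str.lower hostname).toList.dropWhile (· == '.')
  let cand := if PySem.Chars.startswith cand0 ("www.").toList then PySem.List.slice cand0 (some 4) none else cand0
  scanB cand

-- ===== PRECONDITION & SPEC =====
def Spec_hostname_default_py (hostname : String) (out : Option String) : Prop := out = hostname_default_py_alt hostname
instance (hostname : String) (out : Option String) : Decidable (Spec_hostname_default_py hostname out) := by unfold Spec_hostname_default_py; infer_instance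

-- ===== CLAIM (what is proved, stated in full; the proofs are below) =====
def Claim_equal_hostname_default_py : Prop := ∀ (hostname : String), Dom_hostname_default_py hostname → Spec_hostname_default_py hostname (hostname_default_py hostname)

-- ===== LEMMAS AND PROOFS =====

-- A's per-entry test, as a Prop
def Matches (host k : List Char) : Prop := host = k ∨ ('.' :: k) <:+ host

-- table facts, checked by the kernel
set_option maxRecDepth 10000 in
theorem tbl_nodup : (shipfromTable.map Prod.fst).Nodup := by decide

set_option maxRecDepth 10000 in
theorem tbl_nocross : ∀ p ∈ shipfromTable, ∀ q ∈ shipfromTable, ¬ ('.' :: p.1 <:+ q.1) := by decide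

-- B's lookup function agrees with A's table: a hit is a table entry …
set_option maxRecDepth 10000 in
theorem shipCode_some (s : String) (c : String) (h : shipCode s = some c) :
    (s.toList, c) ∈ shipfromTable := by
  unfold shipCode at h
  split at h
  all_goals first
    | (injection h with h; subst h; decide)
    | simp at h

-- … and every table key is a hit
set_option maxRecDepth 10000 in
theorem shipCode_hit : ∀ p ∈ shipfromTable, (shipCode (String.ofList p.1)).isSome = true := by decide

-- at most one table key matches any host
theorem matches_uniq {host k1 k2 : List Char} (h1 : k1 ∈ shipfromTable.map Prod.fst)
    (h2 : k2 ∈ shipfromTable.map Prod.fst) (m1 : Matches host k1) (m2 : Matches host k2) :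
    k1 = k2 := by
  obtain ⟨⟨k1', c1⟩, hp, rfl⟩ := List.mem_map.mp h1
  obtain ⟨⟨k2', c2⟩, hq, rfl⟩ := List.mem_map.mp h2
  rcases m1 with rfl | s1
  · rcases m2 with rfl | s2
    · rfl
    · exact absurd s2 (tbl_nocross ⟨_,c2⟩ hq ⟨_,c1⟩ hp)
  · rcases m2 with rfl | s2
    · exact absurd s1 (tbl_nocross ⟨_,c1⟩ hp ⟨_,c2⟩ hq)
    · rcases List.suffix_or_suffix_of_suffix s1 s2 with hs | hs
      · rcases List.suffix_cons_iff.mp hs with he | hs'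
        · exact (List.cons.injEq _ _ _ _ ▸ he).2
        · exact absurd hs' (tbl_nocross ⟨_,c1⟩ hp ⟨_,c2⟩ hq)
      · rcases List.suffix_cons_iff.mp hs with he | hs'
        · exact ((List.cons.injEq _ _ _ _ ▸ he).2).symm
        · exact absurd hs' (tbl_nocross ⟨_,c2⟩ hq ⟨_,c1⟩ hp)

theorem lookupA_cond_iff (host k : List Char) :
    (host == k || PySem.Chars.endswith host ('.' :: k)) = true ↔ Matches host k := by
  simp [Matches, PySem.Chars.endswith_iff]

theorem lookupA_eq_none_of (host : List Char) (tbl : List (List Char × String))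
    (hnone : ∀ k c, (k, c) ∈ tbl → ¬ Matches host k) : lookupA host tbl = none := by
  induction tbl with
  | nil => rfl
  | cons p rest ih =>
    obtain ⟨k0, c0⟩ := p
    rw [lookupA]
    rw [if_neg]
    · exact ih fun k c hm => hnone k c (List.mem_cons_of_mem _ hm)
    · intro hc
      exact hnone k0 c0 List.mem_cons_self ((lookupA_cond_iff host k0).mp hc)

theorem lookupA_eq_some_of (host k : List Char) (c : String) (tbl : List (List Char × String))
    (hk : (k, c) ∈ tbl) (hP : Matches host k)
    (huniq : ∀ k' c', (k', c') ∈ tbl → Matches host k' → k' = k)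
    (hval : ∀ c', (k, c') ∈ tbl → c' = c) : lookupA host tbl = some c := by
  induction tbl with
  | nil => cases hk
  | cons p rest ih =>
    obtain ⟨k0, c0⟩ := p
    rw [lookupA]
    by_cases hc : Matches host k0
    · have hk0 : k0 = k := huniq k0 c0 List.mem_cons_self hc
      subst hk0
      have hc0 : c0 = c := hval c0 List.mem_cons_self
      subst hc0
      rw [if_pos ((lookupA_cond_iff host k0).mpr hc)]
    · rw [if_neg (fun hb => hc ((lookupA_cond_iff host k0).mp hb))]
      have hk' : (k, c) ∈ rest := by
        rcases List.mem_cons.mp hk with he | hm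
        · exact absurd (by injection he with h1 _; exact h1 ▸ hP) hc
        · exact hm
      exact ih hk' (fun k' c' hm hP' => huniq k' c' (List.mem_cons_of_mem _ hm) hP')
        (fun c' hm => hval c' (List.mem_cons_of_mem _ hm))

-- dropping to just past the first dot keeps every dot-boundary suffix strictly inside the host
theorem first_dot_step (host k : List Char) (hd : 0 ≤ PySem.Chars.find host ['.'])
    (hk : ('.' :: k) <:+ host) :
    k = host.drop (PySem.Chars.find host ['.'] + 1).toNat ∨
      ('.' :: k) <:+ host.drop (PySem.Chars.find host ['.'] + 1).toNat := by
  obtain ⟨pre, hpre⟩ := hk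
  have hspec := PySem.Chars.find_spec (s := host) (sub := ['.']) hd
  set i := (PySem.Chars.find host ['.']).toNat with hi
  have hit : (PySem.Chars.find host ['.'] + 1).toNat = i + 1 := by omega
  have hdotpre : ['.'] <+: host.drop pre.length := by
    rw [← hpre, List.drop_left]
    exact ⟨k, rfl⟩
  have hle : i ≤ pre.length := by
    by_contra hgt
    exact (hspec.2 pre.length (by omega)) hdotpre
  rw [hit]
  rcases Nat.eq_or_lt_of_le hle with heq | hlt
  · left
    rw [← hpre, heq, show pre.length + 1 = (pre ++ ['.']).length by simp,
      show pre ++ '.' :: k = (pre ++ ['.']) ++ k by simp, List.drop_left]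
  · right
    rw [← hpre, List.drop_append_of_le_length (by omega)]
    exact List.suffix_append _ _

theorem scanB_eq_some (host : List Char) :
    ∀ c, scanB host = some c → ∃ k, (k, c) ∈ shipfromTable ∧ Matches host k := by
  induction host using scanB.induct with
  | case1 x code hg =>
    intro c hs
    rw [scanB.eq_def, hg] at hs
    simp only at hs
    injection hs with hc
    subst hc
    have hm := shipCode_some (String.ofList x) code hg
    refine ⟨x, ?_, Or.inl rfl⟩
    simpa [String.toList_ofList] using hm
  | case2 x hg hlt =>
    intro c hs
    rw [scanB.eq_def, hg] at hs
    simp only [dif_pos hlt] at hs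
    simp at hs
  | case3 x hg hlt ih =>
    intro c hs
    rw [scanB.eq_def, hg] at hs
    simp only [dif_neg hlt] at hs
    have hd : 0 ≤ PySem.Chars.find x ['.'] := le_of_not_gt hlt
    obtain ⟨k, hk, hP⟩ := ih c hs
    -- x.drop i = '.' :: x.drop (i+1), and it is a suffix of x
    have hspec := PySem.Chars.find_spec (s := x) (sub := ['.']) hd
    obtain ⟨t, ht⟩ := hspec.1
    have h2 : x.drop ((PySem.Chars.find x ['.']).toNat) = '.' :: t := by rw [← ht]; rfl
    have htail : x.drop ((PySem.Chars.find x ['.']).toNat + 1) = t := by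
      rw [← List.tail_drop, h2]
      rfl
    have hit : (PySem.Chars.find x ['.'] + 1).toNat = (PySem.Chars.find x ['.']).toNat + 1 := by omega
    have hsuf : ('.' :: x.drop (PySem.Chars.find x ['.'] + 1).toNat) <:+ x := by
      rw [hit, htail, h2.symm]
      exact List.drop_suffix _ _
    refine ⟨k, hk, Or.inr ?_⟩
    rcases hP with rfl | hs2
    · exact hsuf
    · exact hs2.trans ((List.suffix_cons _ _).trans hsuf)

theorem scanB_eq_none (host : List Char) :
    scanB host = none → ∀ k c, (k, c) ∈ shipfromTable → ¬ Matches host k := by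
  induction host using scanB.induct with
  | case1 x code hg =>
    intro hs
    rw [scanB.eq_def, hg] at hs
    simp at hs
  | case2 x hg hlt =>
    intro _ k c hk hP
    have hknk : x ≠ k := by
      rintro rfl
      have := shipCode_hit (x, c) hk
      rw [hg] at this
      simp at this
    have hsuf : ('.' :: k) <:+ x := hP.resolve_left hknk
    have hne : ¬ (['.'] <:+: x) := by
      rw [← PySem.Chars.find_eq_neg_one_iff]
      have := PySem.Chars.neg_one_le_find (s := x) (sub := ['.'])
      omega
    have hin : ['.'] <:+: ('.' :: k) := ⟨[], k, rfl⟩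
    exact hne (hin.trans hsuf.isInfix)
  | case3 x hg hlt ih =>
    intro hs k c hk hP
    rw [scanB.eq_def, hg] at hs
    simp only [dif_neg hlt] at hs
    have hknk : x ≠ k := by
      rintro rfl
      have := shipCode_hit (x, c) hk
      rw [hg] at this
      simp at this
    have hsuf : ('.' :: k) <:+ x := hP.resolve_left hknk
    have hd : 0 ≤ PySem.Chars.find x ['.'] := le_of_not_gt hlt
    have ih' := ih hs k c hk
    rcases first_dot_step x k hd hsuf with he | h2
    · exact ih' (Or.inl he.symm)
    · exact ih' (Or.inr h2)

theorem lookup_eq_scan (host : List Char) : lookupA host shipfromDict.items = scanB host := by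
  have hitems : shipfromDict.items = shipfromTable := rfl
  rw [hitems]
  cases hs : scanB host with
  | some c =>
    obtain ⟨k, hk, hP⟩ := scanB_eq_some host c hs
    exact lookupA_eq_some_of host k c shipfromTable hk hP
      (fun k' c' hm hP' =>
        matches_uniq (List.mem_map_of_mem hm) (List.mem_map_of_mem hk) hP' hP)
      (fun c' hm => by
        have := List.inj_on_of_nodup_map tbl_nodup hm hk rfl
        injection this)
  | none =>
    exact lookupA_eq_none_of host shipfromTable (fun k c hm => scanB_eq_none host hs k c hm)

-- ===== VERDICT (by name: the statement is the Claim_ definition above) =====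
theorem hostname_default_py_spec : Claim_equal_hostname_default_py := by
  intro hostname _
  unfold Spec_hostname_default_py hostname_default_py hostname_default_py_alt
  exact lookup_eq_scan _
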